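-- pv_equiv track=rewrite | github.com/niwatoro/dungeon-letter | dungeon/drawer.py | _scale_grid
-- ===== SOURCE A (Python) =====
-- from typing import Sequence, TypeVar
--
-- T = TypeVar("T")
--
-- def _scale_grid(grid: Sequence[Sequence[T]], factor: int) -> list[list[T]]:
--     """Repeat each row and column to scale the grid by ``factor``."""
--     if factor <= 1:
--         return [list(row) for row in grid]
--     scaled: list[list[T]] = []
--     for row in grid:
--         expanded_row: list[T] = []
--         for cell in row:
--             expanded_row.extend([cell] * factor)
--         for _ in range(factor):
--             scaled.append(list(expanded_row))
--     return scaled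
-- ===== SOURCE B (Python) =====
-- def _scale_grid(grid, factor):
--     """Repeat each row and column to scale the grid by ``factor``."""
--     if factor <= 1:
--         return [list(row) for row in grid]
--     out = []
--     for i in range(len(grid) * factor):
--         src = grid[i // factor]
--         out.append([src[j // factor] for j in range(len(src) * factor)])
--     return out
-- ===== Notes on version B (the rewrite author's own statement) =====
-- stated objective: alternative
-- what changed: B builds the output directly by index mapping out[i][j] = grid[i//factor][j//factor] over output coordinates, instead of A's accumulation that extends an expanded row cell by cell and appends copies of it.
import Mathlib
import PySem

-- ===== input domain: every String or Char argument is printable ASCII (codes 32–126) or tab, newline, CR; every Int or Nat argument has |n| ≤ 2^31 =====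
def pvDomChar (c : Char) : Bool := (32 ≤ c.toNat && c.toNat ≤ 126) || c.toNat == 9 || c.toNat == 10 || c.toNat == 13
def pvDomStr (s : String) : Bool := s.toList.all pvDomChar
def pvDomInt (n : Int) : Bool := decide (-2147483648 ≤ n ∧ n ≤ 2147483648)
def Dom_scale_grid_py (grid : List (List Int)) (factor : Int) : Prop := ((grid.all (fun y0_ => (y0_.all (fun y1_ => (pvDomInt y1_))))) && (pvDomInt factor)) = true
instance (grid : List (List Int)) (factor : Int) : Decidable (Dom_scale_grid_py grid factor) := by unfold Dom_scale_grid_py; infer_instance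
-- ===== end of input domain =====

-- B builds the output directly by index mapping out[i][j] = grid[i//factor][j//factor]
-- over output coordinates, instead of A's per-row expand-and-duplicate accumulation
-- (objective: alternative decomposition, same cost).

-- ===== PORT A =====
-- literal port of _scale_grid: expand each row cell by cell, then append `factor` copies
def scale_grid_py (grid : List (List Int)) (factor : Int) : List (List Int) :=
  if factor ≤ 1 then
    grid.map (fun row => row)
  else
    grid.foldl (fun scaled row =>
      let expanded := row.foldl (fun er cell => er ++ List.replicate factor.toNat cell) []
      (List.range factor.toNat).foldl (fun s _ => s ++ [expanded]) scaled) []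

-- ===== PORT B =====
-- literal port of Source B: each output cell by integer-division index mapping
def scale_grid_py_alt (grid : List (List Int)) (factor : Int) : List (List Int) :=
  if factor ≤ 1 then
    grid.map (fun row => row)
  else
    (List.range (grid.length * factor.toNat)).map (fun i =>
      let src := grid.getD (i / factor.toNat) []
      (List.range (src.length * factor.toNat)).map (fun j => src.getD (j / factor.toNat) 0))

-- ===== PRECONDITION & SPEC =====
def Spec_scale_grid_py (grid : List (List Int)) (factor : Int) (out : List (List Int)) : Prop := out = scale_grid_py_alt grid factor
instance (grid : List (List Int)) (factor : Int) (out : List (List Int)) : Decidable (Spec_scale_grid_py grid factor out) := by unfold Spec_scale_grid_py; infer_instance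

-- ===== CLAIM (what is proved, stated in full; the proofs are below) =====
def Claim_equal_scale_grid_py : Prop := ∀ (grid : List (List Int)) (factor : Int), Dom_scale_grid_py grid factor → Spec_scale_grid_py grid factor (scale_grid_py grid factor)

-- ===== LEMMAS AND PROOFS =====

-- A's append-to-accumulator folds pulled out of the accumulator
theorem pv_foldl_app {α β : Type} (f : α → List β) :
    ∀ (l : List α) (acc : List β), l.foldl (fun a x => a ++ f x) acc = acc ++ l.flatMap f := by
  intro l
  induction l with
  | nil => simp
  | cons x xs ih => intro acc; simp [ih, List.append_assoc]

theorem pv_foldl_dup {α : Type} (e : α) :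
    ∀ (l : List Nat) (acc : List α), l.foldl (fun s _ => s ++ [e]) acc = acc ++ List.replicate l.length e := by
  intro l
  induction l with
  | nil => simp
  | cons x xs ih =>
    intro acc
    simp [ih, List.replicate_succ, List.append_assoc]

-- index-mapping over range (len*k) equals flatMap of k-fold replication
theorem pv_range_div {α β : Type} (k : Nat) (hk : 0 < k) (d : α) (g : α → β) :
    ∀ (src : List α),
      (List.range (src.length * k)).map (fun i => g (src.getD (i / k) d))
        = src.flatMap (fun x => List.replicate k (g x)) := by
  intro src
  induction src with
  | nil => simp
  | cons x xs ih =>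
    have hlen : (x :: xs).length * k = k + xs.length * k := by
      simp [Nat.succ_mul, Nat.add_comm]
    rw [hlen, List.range_add, List.map_append, List.map_map]
    have h1 : (List.range k).map (fun i => g ((x :: xs).getD (i / k) d))
        = List.replicate k (g x) := by
      rw [List.eq_replicate_iff]
      constructor
      · simp
      · intro b hb
        rcases List.mem_map.mp hb with ⟨i, hi, hval⟩
        have : i / k = 0 := Nat.div_eq_of_lt (List.mem_range.mp hi)
        simpa [this] using hval.symm
    have h2 : (List.range (xs.length * k)).map
          ((fun i => g ((x :: xs).getD (i / k) d)) ∘ (fun j => k + j))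
        = (List.range (xs.length * k)).map (fun i => g (xs.getD (i / k) d)) := by
      apply List.map_congr_left
      intro i _
      have : (k + i) / k = i / k + 1 := by
        rw [Nat.add_comm, Nat.add_div_right _ hk]
      simp [Function.comp, this]
    rw [h1, h2, ih]
    simp

theorem pv_main (grid : List (List Int)) (factor : Int) :
    scale_grid_py grid factor = scale_grid_py_alt grid factor := by
  unfold scale_grid_py scale_grid_py_alt
  by_cases h : factor ≤ 1
  · simp [h]
  · simp only [h, if_false]
    have hk : 0 < factor.toNat := by omega
    rw [pv_range_div factor.toNat hk ([] : List Int)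
      (fun src => (List.range (src.length * factor.toNat)).map (fun j => src.getD (j / factor.toNat) 0)) grid]
    have hinner : ∀ row : List Int,
        (List.range (row.length * factor.toNat)).map (fun j => row.getD (j / factor.toNat) 0)
          = row.flatMap (fun c => List.replicate factor.toNat c) := by
      intro row
      exact pv_range_div factor.toNat hk (0 : Int) id row
    calc grid.foldl (fun scaled row =>
          (List.range factor.toNat).foldl (fun s _ => s ++ [row.foldl (fun er cell => er ++ List.replicate factor.toNat cell) []]) scaled) []
        = grid.foldl (fun scaled row =>
            scaled ++ List.replicate factor.toNat (row.flatMap (fun c => List.replicate factor.toNat c))) [] := by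
          apply List.foldl_ext
          intro acc row _
          rw [pv_foldl_dup, List.length_range, pv_foldl_app (fun c => List.replicate factor.toNat c) row []]
          simp
      _ = grid.flatMap (fun row => List.replicate factor.toNat (row.flatMap (fun c => List.replicate factor.toNat c))) := by
          rw [pv_foldl_app (fun row => List.replicate factor.toNat (row.flatMap (fun c => List.replicate factor.toNat c))) grid []]
          simp
      _ = grid.flatMap (fun row => List.replicate factor.toNat
            ((List.range (row.length * factor.toNat)).map (fun j => row.getD (j / factor.toNat) 0))) := by
          simp only [hinner]

-- ===== VERDICT (by name: the statement is the Claim_ definition above) =====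
theorem scale_grid_py_spec : Claim_equal_scale_grid_py := by
  intro grid factor _
  unfold Spec_scale_grid_py
  exact pv_main grid factor
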